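-- pv_equiv track=rewrite | github.com/gcampolina/DesafioNext | atv04.py | processar_numeros
-- ===== SOURCE A (Python) =====
-- def processar_numeros(numeros):
--     multiplicacao_pares = 1
--     soma_impares = 0
--
--     for numero in numeros:
--         if numero % 2 == 0:
--             multiplicacao_pares *= numero
--         else:
--             soma_impares += numero
--
--     return multiplicacao_pares, soma_impares
-- ===== SOURCE B (Python) =====
-- import math
--
-- def processar_numeros(numeros):
--     pares = [n for n in numeros if n % 2 == 0]
--     impares = [n for n in numeros if n % 2 != 0]
--     return math.prod(pares), sum(impares)
-- ===== Notes on version B (the rewrite author's own statement) =====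
-- stated objective: idiomatic
-- what changed: Replaces the single interleaved accumulator loop with a partition-then-aggregate decomposition: two filter passes building the even and odd sublists, then math.prod and sum as library reducers.
import Mathlib
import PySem

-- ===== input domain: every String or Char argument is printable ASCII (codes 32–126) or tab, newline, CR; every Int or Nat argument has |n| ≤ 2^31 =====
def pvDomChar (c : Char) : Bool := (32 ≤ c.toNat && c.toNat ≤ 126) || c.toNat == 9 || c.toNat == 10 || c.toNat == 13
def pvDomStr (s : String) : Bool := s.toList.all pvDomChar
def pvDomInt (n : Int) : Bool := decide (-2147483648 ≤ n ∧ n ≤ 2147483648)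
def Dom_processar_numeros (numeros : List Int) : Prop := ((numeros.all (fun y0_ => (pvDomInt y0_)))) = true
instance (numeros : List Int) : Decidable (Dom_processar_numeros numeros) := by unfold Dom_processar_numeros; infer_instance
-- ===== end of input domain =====

-- ===== PORT A =====
-- one header line: B replaces the interleaved accumulation loop with partition-then-aggregate (filter twice, then prod and sum); idiomatic, same cost.
def processar_numeros (numeros : List Int) : Int × Int :=
  numeros.foldl
    (fun st numero =>
      if PySem.Int.mod numero 2 = 0 then (st.1 * numero, st.2)
      else (st.1, st.2 + numero))
    (1, 0)

-- ===== PORT B =====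
def processar_numeros_alt (numeros : List Int) : Int × Int :=
  let pares := numeros.filter (fun n => PySem.Int.mod n 2 = 0)
  let impares := numeros.filter (fun n => PySem.Int.mod n 2 ≠ 0)
  (pares.foldl (· * ·) 1, impares.sum)

-- ===== PRECONDITION & SPEC =====
def Spec_processar_numeros (numeros : List Int) (out : Int × Int) : Prop := out = processar_numeros_alt numeros
instance (numeros : List Int) (out : Int × Int) : Decidable (Spec_processar_numeros numeros out) := by unfold Spec_processar_numeros; infer_instance

-- ===== CLAIM (what is proved, stated in full; the proofs are below) =====
def Claim_equal_processar_numeros : Prop := ∀ (numeros : List Int), Dom_processar_numeros numeros → Spec_processar_numeros numeros (processar_numeros numeros)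

-- ===== LEMMAS AND PROOFS =====

-- ===== VERDICT (by name: the statement is the Claim_ definition above) =====
theorem pv_mul_shift (ys : List Int) (a b : Int) :
    ys.foldl (· * ·) (a * b) = a * ys.foldl (· * ·) b := by
  induction ys generalizing b with
  | nil => rfl
  | cons y ys ih => rw [List.foldl_cons, List.foldl_cons, mul_assoc, ih]

-- loop invariant: A's fold from accumulator (m, s) yields (m * prod of evens, s + sum of odds)
theorem pv_fold_inv (numeros : List Int) (m s : Int) :
    numeros.foldl
      (fun st numero =>
        if PySem.Int.mod numero 2 = 0 then (st.1 * numero, st.2)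
        else (st.1, st.2 + numero))
      (m, s)
    = (m * ((numeros.filter (fun n => PySem.Int.mod n 2 = 0)).foldl (· * ·) 1),
       s + (numeros.filter (fun n => PySem.Int.mod n 2 ≠ 0)).sum) := by
  induction numeros generalizing m s with
  | nil => simp
  | cons x xs ih =>
    rw [List.foldl_cons, List.filter_cons, List.filter_cons]
    by_cases h : PySem.Int.mod x 2 = 0
    · rw [if_pos h, if_pos (by simpa using h),
        if_neg (by simpa using h), ih, List.foldl_cons]
      have : (1 : Int) * x = x * 1 := by ring
      rw [this, pv_mul_shift, mul_assoc]
    · rw [if_neg h, if_neg (by simpa using h),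
        if_pos (by simpa using h), ih, List.sum_cons, add_assoc]

theorem processar_numeros_spec : Claim_equal_processar_numeros := by
  intro numeros _
  unfold Spec_processar_numeros processar_numeros processar_numeros_alt
  rw [pv_fold_inv, one_mul, zero_add]
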